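-- pv_equiv track=rewrite | github.com/remekozicki/ASD | do_egz_t1/z3_egz_20_21_t1/zadanie3_dynamik_przedzialy.py | zadanie
-- ===== SOURCE A (Python) =====
-- def sumy(u,v):
--     x_u,y_u = u
--     x_v,y_v = v
--     if y_u < x_v or y_v < x_u:
--         a = b = 0
--
--     elif x_u <= x_v:
--         if y_u <= y_v:
--             a = x_v
--             b = y_u
--         elif y_u > y_v:
--             a = x_v
--             b = y_v
--
--     elif x_u > x_v:
--         if y_u <= y_v:
--             a = x_u
--             b = y_u
--         elif y_u > y_v:
--             a = x_u
--             b = y_v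
--
--     return a,b
--
-- def zadanie(A,k):
--
--     CP = []
--     n = len(A)
--     for i, x, in enumerate(A):
--         CP.append([x[0],x[1],i])
--
--
--     DP = [[None for i in range(k+1)] for j in range(n)]
--     idx = 0
--
--     a,b = rec(A,k,CP,DP,idx,n)
--     maxi = b-a
--     return maxi
--
-- def rec(A,k,CP,DP,idx,n):
--
--     if k == 0:
--         return A[idx]
--
--     if n-k-1 > idx:
--         return (0,0)
--
--     if DP[idx][k] != None:
--         return DP[idx][k]
--
--     maxdiff = 0
--     maxrange = (0,0)
--
--     for i in range(idx+1,n):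
--         inter = sumy(A[i],rec(A,k-1,CP,DP,i,n))
--
--         if inter[1] - inter[0] > maxdiff:
--             maxdiff = inter[1] - inter[0]
--             maxrange = inter
--
--     DP[idx][k] = maxrange
--     return maxrange
-- ===== SOURCE B (Python) =====
-- def inter(u, v):
--     if u[1] < v[0] or v[1] < u[0]:
--         return (0, 0)
--     return (max(u[0], v[0]), min(u[1], v[1]))
--
-- def zadanie(A, k):
--     n = len(A)
--     if k == 0:
--         x, y = A[0]
--         return y - x
--     if k < 0 or n - k - 1 > 0:
--         return 0
--     prev = list(A)
--     for j in range(1, k + 1):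
--         ps = [inter(A[i], prev[i]) for i in range(n)]
--         cur = []
--         best = (0, 0)
--         for idx in range(n - 1, -1, -1):
--             if n - j - 1 > idx:
--                 cur.append((0, 0))
--             elif best[1] - best[0] > 0:
--                 cur.append(best)
--             else:
--                 cur.append((0, 0))
--             p = ps[idx]
--             if p[1] - p[0] >= best[1] - best[0]:
--                 best = p
--         cur.reverse()
--         if j >= n - 1 and cur == prev:
--             break  # fixed point: the layer map no longer depends on j, later layers are identical
--         prev = cur
--     x, y = prev[0]
--     return y - x
-- ===== Notes on version B (the rewrite author's own statement) =====
-- stated objective: faster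
-- what changed: Replaces the memoized top-down recursion over states (idx, k) by an explicit bottom-up layered DP that prunes the root-guarded case up front, computes each layer with one descending suffix-max scan (>= keeps the earliest maximum) instead of an O(n) ascending inner scan per idx, stops early at a fixed point once the layer map no longer depends on j (j >= n-1), and replaces sumy's four-way branch cascade by a max/min intersection after the same disjointness test.
import Mathlib
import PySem

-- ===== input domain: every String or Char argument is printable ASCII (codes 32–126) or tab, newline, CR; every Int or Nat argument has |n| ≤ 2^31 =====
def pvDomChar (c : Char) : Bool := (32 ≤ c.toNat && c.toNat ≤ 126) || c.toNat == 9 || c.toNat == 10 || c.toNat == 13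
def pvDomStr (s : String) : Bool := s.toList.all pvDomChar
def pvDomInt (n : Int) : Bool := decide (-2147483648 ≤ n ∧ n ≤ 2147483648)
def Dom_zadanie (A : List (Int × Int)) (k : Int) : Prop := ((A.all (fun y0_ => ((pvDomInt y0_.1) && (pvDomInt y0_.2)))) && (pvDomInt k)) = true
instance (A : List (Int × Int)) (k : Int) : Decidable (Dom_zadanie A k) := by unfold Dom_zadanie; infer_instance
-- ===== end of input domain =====

-- B replaces the memoized top-down recursion by a bottom-up layered DP: root-guard pruned up front, each layer one O(n) suffix-max scan, and a fixed-point break once the layer map is j-independent (measured faster on a timing run's large inputs).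

-- ===== PORT A =====

-- Python sumy: the branch cascade, transliterated.
def sumyA (u v : Int × Int) : Int × Int :=
  if u.2 < v.1 ∨ v.2 < u.1 then (0, 0)
  else if u.1 ≤ v.1 then (if u.2 ≤ v.2 then (v.1, u.2) else (v.1, v.2))
  else (if u.2 ≤ v.2 then (u.1, u.2) else (u.1, v.2))

-- Python memo read `DP[idx][k]`; exact for the nonnegative in-range indices rec reaches
-- inside Pre_ (the IndexError inputs — empty A — lie outside Pre_).
def dpGet (DP : List (List (Option (Int × Int)))) (idx k : Int) : Option (Int × Int) :=
  (DP.getD idx.toNat []).getD k.toNat none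

-- Python memo write `DP[idx][k] = v` (rec only writes nonnegative in-range indices).
def dpSet (DP : List (List (Option (Int × Int)))) (idx k : Int) (v : Int × Int) :
    List (List (Option (Int × Int))) :=
  DP.set idx.toNat ((DP.getD idx.toNat []).set k.toNat (some v))

-- Python rec, the DP memo threaded through the recursion and the loop; fuel bounds the
-- recursion depth (every recursive call decreases k by 1 and k == 0 is a base case, so
-- zadanie's fuel k.toNat + 1 is never exhausted on the inputs admitted by Pre_).
def recA (A : List (Int × Int)) (n : Int) :
    Nat → Int → Int → List (List (Option (Int × Int))) →
      ((Int × Int) × List (List (Option (Int × Int))))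
  | fuel, k, idx, DP =>
    if k = 0 then (PySem.List.pyGetD A idx (0, 0), DP)
    else if n - k - 1 > idx then ((0, 0), DP)
    else
      match dpGet DP idx k with
      | some v => (v, DP)
      | none =>
        match fuel with
        | 0 => ((0, 0), DP)  -- out of fuel: not reachable from zadanie inside Pre_
        | fuel' + 1 =>
          let res := (PySem.List.pyRange (idx + 1) n 1).foldl
            (fun st i =>
              let child := recA A n fuel' (k - 1) i st.2.2
              let inter := sumyA (PySem.List.pyGetD A i (0, 0)) child.1
              if inter.2 - inter.1 > st.1 then (inter.2 - inter.1, inter, child.2)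
              else (st.1, st.2.1, child.2))
            ((0 : Int), ((0 : Int), (0 : Int)), DP)
          (res.2.1, dpSet res.2.2 idx k res.2.1)

def zadanie (A : List (Int × Int)) (k : Int) : Int :=
  let _CP := (PySem.List.enumerate A).map (fun p => [p.2.1, p.2.2, p.1])  -- built as in Python; rec never reads it
  let n : Int := A.length
  let DP := List.replicate n.toNat (List.replicate (k + 1).toNat (none : Option (Int × Int)))
  let ab := (recA A n (k.toNat + 1) k 0 DP).1
  ab.2 - ab.1

-- ===== PORT B =====

-- B's helper: intersection as max/min after the same disjointness test.
def interB (u v : Int × Int) : Int × Int :=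
  if u.2 < v.1 ∨ v.2 < u.1 then (0, 0) else (max u.1 v.1, min u.2 v.2)

-- one bottom-up layer: intersections once per i, then one descending suffix-max scan
-- (>= keeps the earliest maximum), clamped to (0,0) when no positive width; finally reversed
def layerB (A : List (Int × Int)) (n j : Int) (prev : List (Int × Int)) : List (Int × Int) :=
  let ps := (PySem.List.pyRange 0 n 1).map
    (fun i => interB (PySem.List.pyGetD A i (0, 0)) (PySem.List.pyGetD prev i (0, 0)))
  let r := (PySem.List.pyRange (n - 1) (-1) (-1)).foldl
    (fun st idx =>
      let cur := st.1 ++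
        [if n - j - 1 > idx then ((0 : Int), (0 : Int))
         else if st.2.2 - st.2.1 > 0 then st.2 else (0, 0)]
      let p := PySem.List.pyGetD ps idx (0, 0)
      (cur, if p.2 - p.1 ≥ st.2.2 - st.2.1 then p else st.2))
    ([], ((0 : Int), (0 : Int)))
  r.1.reverse

-- the layer loop with its fixed-point break (once j >= n-1 the layer map is j-independent)
def layersB (A : List (Int × Int)) (n : Int) : List Int → List (Int × Int) → List (Int × Int)
  | [], prev => prev
  | j :: rest, prev =>
    let cur := layerB A n j prev
    if n - 1 ≤ j ∧ cur = prev then prev else layersB A n rest cur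

def zadanie_alt (A : List (Int × Int)) (k : Int) : Int :=
  let n : Int := A.length
  if k = 0 then
    let p := PySem.List.pyGetD A 0 (0, 0)  -- Python A[0]; the IndexError inputs lie outside Pre_
    p.2 - p.1
  else if k < 0 ∨ n - k - 1 > 0 then 0  -- the root state (0, k) is pruned to width 0
  else
    let prev := layersB A n (PySem.List.pyRange 1 (k + 1) 1) A
    let p := PySem.List.pyGetD prev 0 (0, 0)  -- Python prev[0]; the IndexError inputs lie outside Pre_
    p.2 - p.1

-- ===== PRECONDITION & SPEC =====
-- Pre_ excludes exactly the inputs with empty A and k ≥ -1, on which Python A raises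
-- IndexError (A[0] for k == 0, DP[0] otherwise) and returns no value.
def Pre_zadanie (A : List (Int × Int)) (k : Int) : Prop := A ≠ [] ∨ k ≤ -2
instance (A : List (Int × Int)) (k : Int) : Decidable (Pre_zadanie A k) := by unfold Pre_zadanie; infer_instance

def pvWitness_zadanie : (List (Int × Int)) × Int := ([(1, 5), (2, 7)], 1)

def Spec_zadanie (A : List (Int × Int)) (k : Int) (out : Int) : Prop := out = zadanie_alt A k
instance (A : List (Int × Int)) (k : Int) (out : Int) : Decidable (Spec_zadanie A k out) := by unfold Spec_zadanie; infer_instance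

-- ===== CLAIM (what is proved, stated in full; the proofs are below) =====
def Claim_equal_zadanie : Prop := ∀ (A : List (Int × Int)) (k : Int), Dom_zadanie A k → Pre_zadanie A k → Spec_zadanie A k (zadanie A k)

-- ===== LEMMAS AND PROOFS =====

-- the common pure value of state (idx, layer j): what rec computes and what B's table holds
def Rspec (A : List (Int × Int)) (n : Int) : Nat → Int → (Int × Int)
  | 0, idx => PySem.List.pyGetD A idx (0, 0)
  | j + 1, idx =>
    if n - ((j : Int) + 1) - 1 > idx then (0, 0)
    else (PySem.List.pyRange (idx + 1) n 1).foldl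
      (fun best i =>
        let p := sumyA (PySem.List.pyGetD A i (0, 0)) (Rspec A n j i)
        if p.2 - p.1 > best.2 - best.1 then p else best)
      (0, 0)

theorem sumyA_eq_interB (u v : Int × Int) : sumyA u v = interB u v := by
  rcases u with ⟨a, b⟩; rcases v with ⟨c, d⟩
  simp only [sumyA, interB]
  split_ifs <;> simp_all [Prod.ext_iff, max_def, min_def]

theorem getD_set_char {α : Type} (l : List α) (i : Nat) (r : α) (j : Nat) (d : α) :
    (l.set i r).getD j d = if j = i ∧ i < l.length then r else l.getD j d := by
  simp only [List.getD_eq_getElem?_getD, List.getElem?_set]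
  split_ifs <;> simp_all

-- memo invariant: every stored entry is the pure value of its state
def dpInv (A : List (Int × Int)) (n : Int) (DP : List (List (Option (Int × Int)))) : Prop :=
  ∀ (idx j : Int), 0 ≤ idx → 1 ≤ j →
    dpGet DP idx j = none ∨ dpGet DP idx j = some (Rspec A n j.toNat idx)

theorem dpInv_init (A : List (Int × Int)) (n : Int) (m p : Nat) :
    dpInv A n (List.replicate m (List.replicate p none)) := by
  intro idx j _ _
  left
  unfold dpGet
  simp [List.getElem?_replicate]
  split_ifs
  · simp [List.getD_eq_getElem?_getD, List.getElem?_replicate]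
    split_ifs <;> simp
  · simp [List.getD_eq_getElem?_getD]

theorem dpInv_set (A : List (Int × Int)) (n : Int) (DP : List (List (Option (Int × Int))))
    (idx k : Int) (v : Int × Int) (h : dpInv A n DP) (h0 : 0 ≤ idx) (hk : 1 ≤ k)
    (hv : v = Rspec A n k.toNat idx) : dpInv A n (dpSet DP idx k v) := by
  intro idx' j h0' hj
  unfold dpGet dpSet
  rw [getD_set_char]
  split_ifs with h1
  · rw [getD_set_char]
    split_ifs with h2
    · right
      have hje : j = k := by omega
      have hie : idx' = idx := by omega
      subst hje; subst hie; rw [hv]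
    · have := h idx' j h0' hj
      unfold dpGet at this
      rwa [h1.1] at this
  · exact h idx' j h0' hj

-- the two loop bodies of state (idx, k): rec's (memo threaded) and the pure one
def Fbody (A : List (Int × Int)) (n : Int) (f : Nat) (k : Int) :
    (Int × (Int × Int) × List (List (Option (Int × Int)))) → Int →
      (Int × (Int × Int) × List (List (Option (Int × Int)))) :=
  fun st i =>
    let child := recA A n f (k - 1) i st.2.2
    let inter := sumyA (PySem.List.pyGetD A i (0, 0)) child.1
    if inter.2 - inter.1 > st.1 then (inter.2 - inter.1, inter, child.2)
    else (st.1, st.2.1, child.2)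

def Gbody (A : List (Int × Int)) (n : Int) (j : Nat) :
    (Int × Int) → Int → (Int × Int) :=
  fun best i =>
    let p := sumyA (PySem.List.pyGetD A i (0, 0)) (Rspec A n j i)
    if p.2 - p.1 > best.2 - best.1 then p else best

theorem loop_correct (A : List (Int × Int)) (n : Int) (f : Nat) (k : Int) (j : Nat)
    (hIH : ∀ (k' idx : Int) (DP : List (List (Option (Int × Int)))),
      0 ≤ k' → 0 ≤ idx → k'.toNat < f → dpInv A n DP →
      (recA A n f k' idx DP).1 = Rspec A n k'.toNat idx ∧
        dpInv A n (recA A n f k' idx DP).2)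
    (hk1 : 1 ≤ k) (hkf : k.toNat ≤ f) (hjk : (k - 1).toNat = j) :
    ∀ (l : List Int), (∀ i ∈ l, 0 ≤ i) →
      ∀ (md : Int) (mr : Int × Int) (D : List (List (Option (Int × Int)))),
      dpInv A n D → md = mr.2 - mr.1 →
      (List.foldl (Fbody A n f k) (md, mr, D) l).2.1 = List.foldl (Gbody A n j) mr l ∧
      dpInv A n (List.foldl (Fbody A n f k) (md, mr, D) l).2.2 ∧
      (List.foldl (Fbody A n f k) (md, mr, D) l).1 =
        (List.foldl (Fbody A n f k) (md, mr, D) l).2.1.2 -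
          (List.foldl (Fbody A n f k) (md, mr, D) l).2.1.1 := by
  intro l
  induction l with
  | nil => intro _ md mr D hD hmd; exact ⟨rfl, hD, hmd⟩
  | cons i l ihl =>
    intro hmem0 md mr D hD hmd
    have hi0 : 0 ≤ i := hmem0 i (by simp)
    have hrec := hIH (k - 1) i D (by omega) hi0 (by omega) hD
    rw [hjk] at hrec
    simp only [List.foldl_cons]
    have hF : Fbody A n f k (md, mr, D) i =
        if (sumyA (PySem.List.pyGetD A i (0, 0)) (Rspec A n j i)).2 -
            (sumyA (PySem.List.pyGetD A i (0, 0)) (Rspec A n j i)).1 > md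
        then ((sumyA (PySem.List.pyGetD A i (0, 0)) (Rspec A n j i)).2 -
            (sumyA (PySem.List.pyGetD A i (0, 0)) (Rspec A n j i)).1,
          sumyA (PySem.List.pyGetD A i (0, 0)) (Rspec A n j i), (recA A n f (k - 1) i D).2)
        else (md, mr, (recA A n f (k - 1) i D).2) := by
      simp only [Fbody, hrec.1]
    have hG : Gbody A n j mr i =
        if (sumyA (PySem.List.pyGetD A i (0, 0)) (Rspec A n j i)).2 -
            (sumyA (PySem.List.pyGetD A i (0, 0)) (Rspec A n j i)).1 > mr.2 - mr.1
        then sumyA (PySem.List.pyGetD A i (0, 0)) (Rspec A n j i) else mr := by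
      simp only [Gbody]
    rw [hF, hG, hmd]
    by_cases hc : (sumyA (PySem.List.pyGetD A i (0, 0)) (Rspec A n j i)).2 -
        (sumyA (PySem.List.pyGetD A i (0, 0)) (Rspec A n j i)).1 > mr.2 - mr.1
    · rw [if_pos hc, if_pos hc]
      exact ihl (fun x hx => hmem0 x (by simp [hx])) _ _ _ hrec.2 rfl
    · rw [if_neg hc, if_neg hc]
      exact ihl (fun x hx => hmem0 x (by simp [hx])) _ _ _ hrec.2 rfl

theorem recA_correct (A : List (Int × Int)) (n : Int) :
    ∀ (fuel : Nat) (k idx : Int) (DP : List (List (Option (Int × Int)))),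
      0 ≤ k → 0 ≤ idx → k.toNat < fuel → dpInv A n DP →
      (recA A n fuel k idx DP).1 = Rspec A n k.toNat idx ∧
        dpInv A n (recA A n fuel k idx DP).2 := by
  intro fuel
  induction fuel with
  | zero => intro k idx DP _ _ hf _; exact absurd hf (Nat.not_lt_zero _)
  | succ f IH =>
    intro k idx DP hk hidx hf hInv
    rw [recA]
    by_cases hk0 : k = 0
    · subst hk0
      refine ⟨?_, ?_⟩ <;> simp [Rspec, hInv]
    · have hk1 : 1 ≤ k := by omega
      obtain ⟨j, hj⟩ : ∃ j : Nat, k.toNat = j + 1 := ⟨k.toNat - 1, by omega⟩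
      have hkj : (j : Int) + 1 = k := by omega
      rw [if_neg hk0]
      by_cases hg : n - k - 1 > idx
      · rw [if_pos hg]
        refine ⟨?_, hInv⟩
        rw [hj]; simp only [Rspec]; rw [hkj, if_pos hg]
      · rw [if_neg hg]
        cases hmem : dpGet DP idx k with
        | some v =>
          rcases hInv idx k hidx hk1 with hnone | hsome
          · rw [hmem] at hnone; exact absurd hnone (by simp)
          · rw [hmem] at hsome
            exact ⟨Option.some.inj hsome, hInv⟩
        | none =>
          have hmem0 : ∀ i ∈ PySem.List.pyRange (idx + 1) n 1, 0 ≤ i := by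
            intro i hi
            have := (PySem.List.mem_pyRange_one).1 hi
            omega
          have hloop := loop_correct A n f k j IH hk1 (by omega) (by omega)
            (PySem.List.pyRange (idx + 1) n 1) hmem0 0 (0, 0) DP hInv (by norm_num)
          have heq : Rspec A n k.toNat idx =
              List.foldl (Gbody A n j) (0, 0) (PySem.List.pyRange (idx + 1) n 1) := by
            rw [hj]; simp only [Rspec]; rw [hkj, if_neg hg]; rfl
          refine ⟨?_, ?_⟩
          · rw [heq]
            exact hloop.1
          · exact dpInv_set A n _ idx k _ hloop.2.1 hidx hk1 (hloop.1.trans heq.symm)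

-- B's table after j layers, as the pure values
def prevSpec (A : List (Int × Int)) (n : Int) (j : Nat) : List (Int × Int) :=
  (PySem.List.pyRange 0 n 1).map (fun idx => Rspec A n j idx)

theorem prevSpec_zero (A : List (Int × Int)) : prevSpec A (A.length : Int) 0 = A := by
  unfold prevSpec
  conv_rhs => rw [← PySem.List.map_pyGetD_pyRange_zero' A ((0 : Int), (0 : Int))]
  apply List.map_congr_left
  intro a _
  simp [Rspec]

-- ascending strict-max fold (A's inner loop order) = suffix max with >= (earliest wins), clamped
theorem asc_eq_suf (l : List (Int × Int)) (b0 : Int × Int) (hb : 0 ≤ b0.2 - b0.1) :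
    l.foldl (fun best p => if p.2 - p.1 > best.2 - best.1 then p else best) b0 =
      if (l.foldr (fun p acc => if p.2 - p.1 ≥ acc.2 - acc.1 then p else acc) (0, 0)).2 -
          (l.foldr (fun p acc => if p.2 - p.1 ≥ acc.2 - acc.1 then p else acc) (0, 0)).1 >
          b0.2 - b0.1
      then l.foldr (fun p acc => if p.2 - p.1 ≥ acc.2 - acc.1 then p else acc) (0, 0)
      else b0 := by
  induction l generalizing b0 with
  | nil => simp only [List.foldl_nil, List.foldr_nil]; rw [if_neg (by omega)]
  | cons p l ih =>
    simp only [List.foldl_cons, List.foldr_cons]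
    have hb' : 0 ≤ (if p.2 - p.1 > b0.2 - b0.1 then p else b0).2 -
        (if p.2 - p.1 > b0.2 - b0.1 then p else b0).1 := by
      split_ifs <;> omega
    rw [ih _ hb']
    split_ifs <;> first | rfl | omega

-- suffix best from index t on, and the layer value at idx, for a value function P
def sufF (P : Int → Int × Int) (n t : Int) : Int × Int :=
  ((PySem.List.pyRange t n 1).map P).foldr
    (fun p acc => if p.2 - p.1 ≥ acc.2 - acc.1 then p else acc) (0, 0)

def valF (P : Int → Int × Int) (n jj idx : Int) : Int × Int :=
  if n - jj - 1 > idx then (0, 0)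
  else if (sufF P n (idx + 1)).2 - (sufF P n (idx + 1)).1 > 0 then sufF P n (idx + 1)
  else (0, 0)

theorem sufF_nil (P : Int → Int × Int) (n t : Int) (h : n ≤ t) : sufF P n t = (0, 0) := by
  unfold sufF
  rw [PySem.List.pyRange_one_eq_nil h]
  rfl

theorem sufF_cons (P : Int → Int × Int) (n t : Int) (h : t < n) :
    sufF P n t =
      if (P t).2 - (P t).1 ≥ (sufF P n (t + 1)).2 - (sufF P n (t + 1)).1
      then P t else sufF P n (t + 1) := by
  unfold sufF
  rw [PySem.List.pyRange_one_cons h, List.map_cons, List.foldr_cons]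

theorem descMain (P : Int → Int × Int) (n jj : Int) :
    ∀ (m : Nat), (m : Int) ≤ n → ∀ (cur0 : List (Int × Int)),
    (PySem.List.pyRange ((m : Int) - 1) (-1) (-1)).foldl
      (fun st idx =>
        (st.1 ++ [if n - jj - 1 > idx then ((0 : Int), (0 : Int))
                  else if st.2.2 - st.2.1 > 0 then st.2 else (0, 0)],
         if (P idx).2 - (P idx).1 ≥ st.2.2 - st.2.1 then P idx else st.2))
      (cur0, sufF P n (m : Int)) =
    (cur0 ++ ((PySem.List.pyRange 0 (m : Int) 1).map (valF P n jj)).reverse, sufF P n 0) := by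
  intro m
  induction m with
  | zero =>
    intro _ cur0
    simp only [Nat.cast_zero]
    rw [show (0 : Int) - 1 = -1 by norm_num,
      PySem.List.pyRange_neg_one_eq_nil (le_refl (-1)),
      PySem.List.pyRange_one_eq_nil (le_refl 0)]
    simp
  | succ m ih =>
    intro hm cur0
    rw [show ((m + 1 : Nat) : Int) - 1 = (m : Int) by push_cast; ring,
      PySem.List.pyRange_neg_one_cons (by omega), List.foldl_cons,
      show ((m + 1 : Nat) : Int) = (m : Int) + 1 by push_cast; ring]
    have hstep :
        ((cur0 ++ [if n - jj - 1 > (m : Int) then ((0 : Int), (0 : Int))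
            else if (sufF P n ((m : Int) + 1)).2 - (sufF P n ((m : Int) + 1)).1 > 0
            then sufF P n ((m : Int) + 1) else (0, 0)],
          if (P (m : Int)).2 - (P (m : Int)).1 ≥
              (sufF P n ((m : Int) + 1)).2 - (sufF P n ((m : Int) + 1)).1
          then P (m : Int) else sufF P n ((m : Int) + 1)) :
            List (Int × Int) × (Int × Int)) =
          (cur0 ++ [valF P n jj (m : Int)], sufF P n (m : Int)) := by
      rw [← sufF_cons P n (m : Int) (by omega)]
      unfold valF
      rfl
    rw [hstep, ih (by omega) (cur0 ++ [valF P n jj (m : Int)]),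
      PySem.List.pyRange_one_succ_right (by omega), List.map_append, List.reverse_append]
    simp

theorem descTop (P : Int → Int × Int) (n jj : Int) (hn : 0 ≤ n) :
    (PySem.List.pyRange (n - 1) (-1) (-1)).foldl
      (fun st idx =>
        (st.1 ++ [if n - jj - 1 > idx then ((0 : Int), (0 : Int))
                  else if st.2.2 - st.2.1 > 0 then st.2 else (0, 0)],
         if (P idx).2 - (P idx).1 ≥ st.2.2 - st.2.1 then P idx else st.2))
      ([], (0, 0)) =
    (((PySem.List.pyRange 0 n 1).map (valF P n jj)).reverse, sufF P n 0) := by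
  have h := descMain P n jj n.toNat (by omega) []
  rw [Int.toNat_of_nonneg hn] at h
  rw [sufF_nil P n n (le_refl n)] at h
  rw [h]
  simp

-- the value fed to the suffix scan at index i, on the spec side
def pSpec (A : List (Int × Int)) (n : Int) (j : Nat) (i : Int) : Int × Int :=
  sumyA (PySem.List.pyGetD A i (0, 0)) (Rspec A n j i)

theorem layer_step (A : List (Int × Int)) (j : Nat) :
    layerB A (A.length : Int) ((j : Int) + 1) (prevSpec A (A.length : Int) j) =
      prevSpec A (A.length : Int) (j + 1) := by
  unfold layerB
  simp only []
  rw [descTop (fun i => PySem.List.pyGetD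
      ((PySem.List.pyRange 0 (A.length : Int) 1).map
        (fun i => interB (PySem.List.pyGetD A i (0, 0))
          (PySem.List.pyGetD (prevSpec A (A.length : Int) j) i (0, 0)))) i (0, 0))
    (A.length : Int) ((j : Int) + 1) (by omega)]
  rw [List.reverse_reverse]
  conv_rhs => unfold prevSpec
  apply List.map_congr_left
  intro idx hidx
  have hb := (PySem.List.mem_pyRange_one).1 hidx
  have hsuf : sufF (fun i => PySem.List.pyGetD
      ((PySem.List.pyRange 0 (A.length : Int) 1).map
        (fun i => interB (PySem.List.pyGetD A i (0, 0))
          (PySem.List.pyGetD (prevSpec A (A.length : Int) j) i (0, 0)))) i (0, 0))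
      (A.length : Int) (idx + 1) =
      sufF (pSpec A (A.length : Int) j) (A.length : Int) (idx + 1) := by
    unfold sufF
    congr 1
    apply List.map_congr_left
    intro i hi
    have hbi := (PySem.List.mem_pyRange_one).1 hi
    rw [PySem.List.pyGetD_map_pyRange_of_nonneg _ _ _ _ (by omega) (by omega)]
    unfold prevSpec
    rw [PySem.List.pyGetD_map_pyRange_of_nonneg _ _ _ _ (by omega) (by omega),
      ← sumyA_eq_interB]
    rfl
  unfold valF
  rw [hsuf]
  simp only [Rspec]
  rw [show (fun best i =>
        let p := sumyA (PySem.List.pyGetD A i (0, 0)) (Rspec A (A.length : Int) j i);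
        if p.2 - p.1 > best.2 - best.1 then p else best) =
      (fun (best : Int × Int) (i : Int) =>
        if (pSpec A (A.length : Int) j i).2 - (pSpec A (A.length : Int) j i).1 >
            best.2 - best.1
        then pSpec A (A.length : Int) j i else best) from rfl,
    ← List.foldl_map (f := pSpec A (A.length : Int) j)
      (g := fun (best p : Int × Int) => if p.2 - p.1 > best.2 - best.1 then p else best),
    asc_eq_suf _ _ (by norm_num)]
  unfold sufF
  rfl
theorem layerB_j_indep (A prev : List (Int × Int)) (n jj jj' : Int) (hn : 0 ≤ n)
    (h1 : n - 1 ≤ jj) (h2 : n - 1 ≤ jj') :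
    layerB A n jj prev = layerB A n jj' prev := by
  unfold layerB
  simp only []
  rw [descTop _ n jj hn, descTop _ n jj' hn]
  simp only [List.reverse_reverse]
  apply List.map_congr_left
  intro idx hidx
  have hb := (PySem.List.mem_pyRange_one).1 hidx
  unfold valF
  rw [if_neg (show ¬ n - jj - 1 > idx by omega),
    if_neg (show ¬ n - jj' - 1 > idx by omega)]

theorem prevSpec_stable (A : List (Int × Int)) (j0 : Nat)
    (hj : (A.length : Int) - 1 ≤ (j0 : Int) + 1)
    (hfix : prevSpec A (A.length : Int) (j0 + 1) = prevSpec A (A.length : Int) j0) :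
    ∀ (m : Nat), j0 ≤ m → prevSpec A (A.length : Int) m = prevSpec A (A.length : Int) j0 := by
  intro m
  induction m with
  | zero => intro h; rw [Nat.le_zero.1 h]
  | succ m ih =>
    intro h
    rcases Nat.lt_or_ge j0 (m + 1) with hlt | hge
    · have hm : j0 ≤ m := by omega
      calc prevSpec A (A.length : Int) (m + 1)
          = layerB A (A.length : Int) ((m : Int) + 1) (prevSpec A (A.length : Int) j0) := by
            rw [← layer_step A m, ih hm]
        _ = layerB A (A.length : Int) ((j0 : Int) + 1) (prevSpec A (A.length : Int) j0) :=
            layerB_j_indep A _ _ _ _ (by omega) (by omega) (by omega)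
        _ = prevSpec A (A.length : Int) (j0 + 1) := layer_step A j0
        _ = prevSpec A (A.length : Int) j0 := hfix
    · have : j0 = m + 1 := by omega
      rw [this]

theorem layersB_correct (A : List (Int × Int)) (K : Nat) :
    ∀ (d t : Nat), t + d = K →
    layersB A (A.length : Int) (PySem.List.pyRange ((t : Int) + 1) ((K : Int) + 1) 1)
      (prevSpec A (A.length : Int) t) = prevSpec A (A.length : Int) K := by
  intro d
  induction d with
  | zero =>
    intro t ht
    have hK : t = K := by omega
    subst hK
    rw [PySem.List.pyRange_one_eq_nil (by omega)]
    rfl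
  | succ d ih =>
    intro t ht
    rw [PySem.List.pyRange_one_cons (by omega)]
    show (if (A.length : Int) - 1 ≤ (t : Int) + 1 ∧
        layerB A (A.length : Int) ((t : Int) + 1) (prevSpec A (A.length : Int) t) =
          prevSpec A (A.length : Int) t
      then prevSpec A (A.length : Int) t
      else layersB A (A.length : Int)
        (PySem.List.pyRange ((t : Int) + 1 + 1) ((K : Int) + 1) 1)
        (layerB A (A.length : Int) ((t : Int) + 1) (prevSpec A (A.length : Int) t)))
      = prevSpec A (A.length : Int) K
    rw [layer_step A t]
    split_ifs with hc
    · exact (prevSpec_stable A t hc.1 hc.2 K (by omega)).symm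
    · have := ih (t + 1) (by omega)
      rw [show ((t + 1 : Nat) : Int) + 1 = (t : Int) + 1 + 1 by push_cast; ring] at this
      exact this

theorem layers (A : List (Int × Int)) (m : Nat) :
    layersB A (A.length : Int) (PySem.List.pyRange 1 ((m : Int) + 1) 1) A
      = prevSpec A (A.length : Int) m := by
  have := layersB_correct A m m 0 (by omega)
  rw [show ((0 : Nat) : Int) + 1 = 1 by norm_num, prevSpec_zero A] at this
  exact this

-- the empty-input value of the pure state (0, j)
theorem Rspec_nil (j : Nat) : Rspec [] 0 j 0 = (0, 0) := by
  cases j with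
  | zero => decide
  | succ j =>
    simp only [Rspec]
    rw [if_neg (by omega), PySem.List.pyRange_one_eq_nil (by omega)]
    rfl

-- ===== VERDICT (by name: the statement is the Claim_ definition above) =====
theorem zadanie_spec : Claim_equal_zadanie := by
  intro A k _ hpre
  unfold Spec_zadanie zadanie zadanie_alt
  by_cases hk0 : k = 0
  · subst hk0
    have hrec : (recA A (A.length : Int) 1 0 0
        (List.replicate A.length [none])).1 = PySem.List.pyGetD A 0 (0, 0) := by
      rw [recA]
      rw [if_pos rfl]
    simp [hrec]
  · by_cases hk : k < 0
    · have hg : (A.length : Int) - k - 1 > 0 := by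
        rcases hpre with hA | hK
        · have : 0 < A.length := List.length_pos_of_ne_nil hA
          omega
        · omega
      have hrec : (recA A (A.length : Int) (k.toNat + 1) k 0
          (List.replicate (Int.toNat (A.length : Int))
            (List.replicate (k + 1).toNat none))).1 = (0, 0) := by
        rw [recA]
        rw [if_neg hk0, if_pos hg]
      simp only [if_neg hk0, if_pos (Or.inl hk : k < 0 ∨ (A.length : Int) - k - 1 > 0), hrec]
      norm_num
    · have h0k : 0 ≤ k := by omega
      have hrec := recA_correct A (A.length : Int) (k.toNat + 1) k 0
        (List.replicate (Int.toNat (A.length : Int)) (List.replicate (k + 1).toNat none))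
        h0k (le_refl 0) (Nat.lt_succ_self _) (dpInv_init A _ _ _)
      by_cases hg : (A.length : Int) - k - 1 > 0
      · have hr0 : (recA A (A.length : Int) (k.toNat + 1) k 0
            (List.replicate (Int.toNat (A.length : Int))
              (List.replicate (k + 1).toNat none))).1 = (0, 0) := by
          rw [recA]
          rw [if_neg hk0, if_pos hg]
        simp only [if_neg hk0, if_pos (Or.inr hg : k < 0 ∨ (A.length : Int) - k - 1 > 0), hr0]
        norm_num
      · have hlay := layers A k.toNat
        rw [show ((k.toNat : Int) + 1) = k + 1 by omega] at hlay
        simp only [if_neg hk0, if_neg (by push Not; exact ⟨by omega, by omega⟩ :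
          ¬ (k < 0 ∨ (A.length : Int) - k - 1 > 0)), hrec.1, hlay]
        cases A with
        | nil =>
          simp only [List.length_nil, Int.natCast_zero]
          unfold prevSpec
          rw [PySem.List.pyRange_one_eq_nil (by omega)]
          rw [Rspec_nil]
          rfl
        | cons a as =>
          unfold prevSpec
          rw [PySem.List.pyGetD_map_pyRange_of_nonneg _ _ _ _ (le_refl 0) (by simp)]
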